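-- pv_equiv track=rewrite | github.com/SussyGuy35/open-susbot | lib/sussyutils.py | string_hash_to_newline
-- ===== SOURCE A (Python) =====
-- def string_hash_to_newline(_str: str) -> str:
--     """convert hash in given string to newline"""
--     _result = ""
--     _start = 0
--     i = 0
--     lc = None
--
--     while i < len(_str):
--         c = _str[i]
--         if c == "#":
--             if lc != "\\":
--                 _result += _str[_start:i] + "\n"
--             else:
--                 _result += _str[_start:i - 1] + "#"
--             _start = i + 1
--         lc = c
--         i += 1
--
--     return _result + _str[_start:i]
-- ===== SOURCE B (Python) =====
-- def string_hash_to_newline(_str: str) -> str: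
--     """convert hash in given string to newline"""
--     out = []
--     i = 0
--     n = len(_str)
--     while i < n:
--         if _str[i] == "\\" and i + 1 < n and _str[i + 1] == "#":
--             out.append("#")
--             i += 2
--         elif _str[i] == "#":
--             out.append("\n")
--             i += 1
--         else:
--             out.append(_str[i])
--             i += 1
--     return "".join(out)
-- ===== Notes on version B (the rewrite author's own statement) =====
-- stated objective: simpler
-- what changed: Replaces A's index/last-char/slice bookkeeping (result, _start, lc with segment slicing) by a single forward scan that consumes a backslash-hash pair as one two-character pattern emitting a literal hash, and a bare hash as a newline, appending to a list joined at the end.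
import Mathlib
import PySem

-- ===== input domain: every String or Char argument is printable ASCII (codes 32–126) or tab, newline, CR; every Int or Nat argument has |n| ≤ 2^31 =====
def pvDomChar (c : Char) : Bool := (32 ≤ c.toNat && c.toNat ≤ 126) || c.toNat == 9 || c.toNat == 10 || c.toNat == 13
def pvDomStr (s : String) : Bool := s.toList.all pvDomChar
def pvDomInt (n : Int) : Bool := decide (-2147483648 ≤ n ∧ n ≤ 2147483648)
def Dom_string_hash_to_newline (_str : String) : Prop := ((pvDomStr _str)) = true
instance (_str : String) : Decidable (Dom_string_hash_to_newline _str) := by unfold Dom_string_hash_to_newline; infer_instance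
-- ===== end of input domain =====

-- B replaces A's index/last-char/slice bookkeeping by one forward scan that consumes
-- "\#" as a two-character pattern (objective: simpler; same O(n) cost).

-- ===== PORT A =====
-- literal port of A's while loop: state (_result, _start, i, lc); slices via drop/take
def shtnLoopA (s : List Char) (res : List Char) (start i : Nat) (lc : Option Char) :
    List Char :=
  if h : i < s.length then
    let c := s[i]
    if c = '#' then
      if lc ≠ some '\\' then
        shtnLoopA s (res ++ (s.drop start).take (i - start) ++ ['\n']) (i + 1) (i + 1) (some c)
      else
        shtnLoopA s (res ++ (s.drop start).take (i - 1 - start) ++ ['#']) (i + 1) (i + 1) (some c)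
    else
      shtnLoopA s res start (i + 1) (some c)
  else
    res ++ (s.drop start).take (i - start)
termination_by s.length - i

def string_hash_to_newline (_str : String) : String :=
  String.mk (shtnLoopA _str.toList [] 0 0 none)

-- ===== PORT B =====
-- port of B's scan: consume "\#" (two chars) → '#', "#" → '\n', anything else as-is
def shtnScanB : List Char → List Char
  | '\\' :: '#' :: rest => '#' :: shtnScanB rest
  | '#' :: rest => '\n' :: shtnScanB rest
  | c :: rest => c :: shtnScanB rest
  | [] => []

def string_hash_to_newline_alt (_str : String) : String :=
  String.mk (shtnScanB _str.toList)

-- ===== PRECONDITION & SPEC =====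
def Spec_string_hash_to_newline (_str : String) (out : String) : Prop := out = string_hash_to_newline_alt _str
instance (_str : String) (out : String) : Decidable (Spec_string_hash_to_newline _str out) := by unfold Spec_string_hash_to_newline; infer_instance

-- ===== CLAIM (what is proved, stated in full; the proofs are below) =====
def Claim_equal_string_hash_to_newline : Prop := ∀ (_str : String), Dom_string_hash_to_newline _str → Spec_string_hash_to_newline _str (string_hash_to_newline _str)

-- ===== LEMMAS AND PROOFS =====

-- B's scan is the identity on '#'-free lists
lemma shtnScanB_no_hash (seg : List Char) (h : '#' ∉ seg) : shtnScanB seg = seg := by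
  induction seg with
  | nil => rfl
  | cons c t ih =>
    have hc : c ≠ '#' := fun hc => h (by simp [hc])
    have ht : '#' ∉ t := fun hm => h (List.mem_cons_of_mem _ hm)
    match t, ht with
    | [], _ => simp [shtnScanB, hc]
    | d :: t', ht =>
      have hd : d ≠ '#' := fun hd => ht (by simp [hd])
      simp only [shtnScanB, hc, hd, if_neg] at *
      have hred := ih ht
      by_cases hcb : c = '\\' <;> simp [shtnScanB, hc, hd, hcb] <;> simpa using hred

-- an unescaped '#' after a '#'-free segment becomes '\n'
lemma shtnScanB_hash (seg rest : List Char) (h : '#' ∉ seg)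
    (hl : seg.getLast? ≠ some '\\') :
    shtnScanB (seg ++ '#' :: rest) = seg ++ '\n' :: shtnScanB rest := by
  induction seg with
  | nil => rfl
  | cons c t ih =>
    have hc : c ≠ '#' := fun hc => h (by simp [hc])
    have ht : '#' ∉ t := fun hm => h (List.mem_cons_of_mem _ hm)
    match t, ht with
    | [], _ =>
      have hcb : c ≠ '\\' := by simpa using hl
      simp [shtnScanB, hc, hcb]
    | d :: t', ht =>
      have hd : d ≠ '#' := fun hd => ht (by simp [hd])
      have hl' : (d :: t').getLast? ≠ some '\\' := by
        simpa [List.getLast?_cons_cons] using hl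
      have hred := ih ht hl'
      by_cases hcb : c = '\\' <;> simp [shtnScanB, hc, hd, hcb] <;> simpa using hred

-- an escaped '#' after a '#'-free segment drops the backslash and keeps '#'
lemma shtnScanB_esc (seg rest : List Char) (h : '#' ∉ seg) :
    shtnScanB (seg ++ '\\' :: '#' :: rest) = seg ++ '#' :: shtnScanB rest := by
  induction seg with
  | nil => rfl
  | cons c t ih =>
    have hc : c ≠ '#' := fun hc => h (by simp [hc])
    have ht : '#' ∉ t := fun hm => h (List.mem_cons_of_mem _ hm)
    match t, ht with
    | [], _ => by_cases hcb : c = '\\' <;> simp [shtnScanB, hc, hcb]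
    | d :: t', ht =>
      have hd : d ≠ '#' := fun hd => ht (by simp [hd])
      have hred := ih ht
      by_cases hcb : c = '\\' <;> simp [shtnScanB, hc, hd, hcb] <;> simpa using hred

-- terminal step: when the input is exhausted, A returns res ++ pending segment,
-- and B's scan is the identity on that ('#'-free) segment
lemma shtnLoopA_end (s : List Char) (i start : Nat) (res : List Char) (lc : Option Char)
    (hi : i = s.length) (hsi : start ≤ i)
    (hseg : ∀ j, start ≤ j → j < i → s[j]! ≠ '#') :
    shtnLoopA s res start i lc =
      res ++ shtnScanB ((s.drop start).take (i - start) ++ s.drop i) := by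
  rw [shtnLoopA]
  simp only [hi, lt_irrefl, dite_false]
  have h1 : s.drop s.length = ([] : List Char) := by simp
  have h2 : (s.drop start).take (s.length - start) = s.drop start := by
    apply List.take_of_length_le
    simp
  rw [h1, h2, List.append_nil]
  rw [shtnScanB_no_hash _ (by
    intro hm
    obtain ⟨j, hj, hval⟩ := List.mem_iff_getElem.mp hm
    have hjlen : start + j < s.length := by simp at hj; omega
    have : s[start + j]! = '#' := by
      rw [getElem!_pos s (start + j) hjlen]
      simpa [List.getElem_drop] using hval
    exact hseg (start + j) (by omega) (by simp at hj; omega) this)]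

-- loop invariant: A's loop produces res ++ B's scan of (pending segment ++ remaining input)
lemma shtnLoopA_eq (s : List Char) :
    ∀ (k i start : Nat) (res : List Char) (lc : Option Char),
      s.length - i ≤ k → start ≤ i → i ≤ s.length →
      (∀ j, start ≤ j → j < i → s[j]! ≠ '#') →
      (start = i → lc ≠ some '\\') →
      (start < i → lc = some (s[i - 1]!)) →
      shtnLoopA s res start i lc =
        res ++ shtnScanB ((s.drop start).take (i - start) ++ s.drop i) := by
  intro k
  induction k with
  | zero =>
    intro i start res lc hk hsi hin hseg hne hlast
    exact shtnLoopA_end s i start res lc (by omega) hsi hseg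
  | succ k ih =>
    intro i start res lc hk hsi hin hseg hne hlast
    by_cases h : i < s.length
    · have hgi : s[i]! = s[i] := getElem!_pos s i h
      have hdropi : s.drop i = s[i] :: s.drop (i + 1) :=
        List.drop_eq_getElem_cons h
      have hnohash : '#' ∉ (s.drop start).take (i - start) := by
        intro hm
        obtain ⟨j, hj, hval⟩ := List.mem_iff_getElem.mp hm
        have hjlen : start + j < s.length := by
          have := hj
          simp [List.length_take, List.length_drop] at this
          omega
        have : s[start + j]! = '#' := by
          rw [getElem!_pos s (start + j) hjlen]
          simpa [List.getElem_take, List.getElem_drop] using hval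
        exact hseg (start + j) (by omega)
          (by have := hj; simp [List.length_take, List.length_drop] at this; omega) this
      have hsucc : ∀ m, start ≤ m → m < s.length →
          (s.drop start).take (m + 1 - start) =
            (s.drop start).take (m - start) ++ [s[m]!] := by
        intro m hm hms
        have h1 : m + 1 - start = (m - start) + 1 := by omega
        rw [h1, List.take_succ]
        have h2 : (s.drop start)[m - start]? = some s[m]! := by
          rw [List.getElem?_drop]
          have : start + (m - start) = m := by omega
          rw [this, List.getElem?_eq_getElem hms, getElem!_pos s m hms]
        simp [h2]
      rw [shtnLoopA]
      simp only [h, dite_true, dif_pos]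
      by_cases hc : s[i] = '#'
      · rw [if_pos hc]
        by_cases hlc : lc = some '\\'
        · -- escaped '#': start < i and s[i-1] = '\'
          rw [if_neg (by simp [hlc])]
          have hlt : start < i := by
            rcases Nat.lt_or_ge start i with h' | h'
            · exact h'
            · exact absurd hlc (hne (by omega))
          have hprev : s[i - 1]! = '\\' := by
            have := hlast hlt; rw [hlc] at this
            exact (Option.some.injEq _ _ ▸ this.symm)
          have hdec : (s.drop start).take (i - start) =
              (s.drop start).take (i - 1 - start) ++ ['\\'] := by
            have h1 : i - 1 + 1 = i := by omega
            have := hsucc (i - 1) (by omega) (by omega)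
            rw [h1] at this
            rw [this, hprev]
          have hnohash' : '#' ∉ (s.drop start).take (i - 1 - start) := by
            intro hm; exact hnohash (by rw [hdec]; exact List.mem_append_left _ hm)
          rw [ih (i + 1) (i + 1) _ _ (by omega) (by omega) (by omega)
                (by intro j h1 h2; omega)
                (by intro _; simp [hgi, hc])
                (by intro h'; omega)]
          rw [hdropi, hc, hdec]
          simp only [List.append_assoc, List.singleton_append]
          rw [shtnScanB_esc _ _ hnohash']
          simp
        · -- unescaped '#'
          rw [if_pos hlc]
          have hlastne : ((s.drop start).take (i - start)).getLast? ≠ some '\\' := by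
            rcases Nat.lt_or_ge start i with h' | h'
            · have hdec := hsucc (i - 1) (by omega) (by omega)
              have h1 : i - 1 + 1 = i := by omega
              rw [h1] at hdec
              rw [hdec, List.getLast?_concat]
              intro hcon
              apply hlc
              rw [hlast h']
              simpa using hcon
            · have : i - start = 0 := by omega
              simp [this]
          rw [ih (i + 1) (i + 1) _ _ (by omega) (by omega) (by omega)
                (by intro j h1 h2; omega)
                (by intro _; simp [hgi, hc])
                (by intro h'; omega)]
          rw [hdropi, hc, shtnScanB_hash _ _ hnohash hlastne]
          simp
      · -- ordinary character
        rw [if_neg hc]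
        rw [ih (i + 1) start _ _ (by omega) (by omega) (by omega)
              (by intro j h1 h2
                  by_cases hji : j = i
                  · subst hji; rw [hgi]; exact hc
                  · exact hseg j h1 (by omega))
              (by intro h'; omega)
              (by intro _; simp [hgi])]
        rw [hdropi, hsucc i hsi h, hgi]
        simp
    · exact shtnLoopA_end s i start res lc (by omega) hsi hseg

-- ===== VERDICT (by name: the statement is the Claim_ definition above) =====
theorem string_hash_to_newline_spec : Claim_equal_string_hash_to_newline := by
  intro s _
  unfold Spec_string_hash_to_newline string_hash_to_newline string_hash_to_newline_alt
  rw [shtnLoopA_eq s.toList s.toList.length 0 0 [] none (by omega) (by omega) (by omega)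
        (by intro j h1 h2; omega) (by intro _; simp) (by intro h; omega)]
  simp
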